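-- pv_equiv track=rewrite | github.com/Koi-ren/3rd_Project | 3rd_control_gr.py | calculate_rotation
-- ===== SOURCE A (Python) =====
-- def calculate_rotation(current_bearing, target_bearing):
--     diff = target_bearing - current_bearing
--     while diff > 180:
--         diff -= 360
--     while diff < -180:
--         diff += 360
--     if diff == 0:
--         return "회전 불필요", 0
--     elif diff > 0:
--         direction = "시계방향"
--         angle = diff
--     else:
--         direction = "반시계방향"
--         angle = -diff
--     return direction, angle
-- ===== SOURCE B (Python) =====
-- def calculate_rotation(current_bearing, target_bearing):
--     d = target_bearing - current_bearing
--     if d > 180: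
--         d = 180 - (180 - d) % 360
--     elif d < -180:
--         d = (d + 180) % 360 - 180
--     if d == 0:
--         return "회전 불필요", 0
--     return ("시계방향", d) if d > 0 else ("반시계방향", -d)
-- ===== Notes on version B (the rewrite author's own statement) =====
-- stated objective: simpler
-- what changed: Replaces the two while-loop reductions by closed-form modular normalization (one % expression per side), keeping the final branching.
import Mathlib
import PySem

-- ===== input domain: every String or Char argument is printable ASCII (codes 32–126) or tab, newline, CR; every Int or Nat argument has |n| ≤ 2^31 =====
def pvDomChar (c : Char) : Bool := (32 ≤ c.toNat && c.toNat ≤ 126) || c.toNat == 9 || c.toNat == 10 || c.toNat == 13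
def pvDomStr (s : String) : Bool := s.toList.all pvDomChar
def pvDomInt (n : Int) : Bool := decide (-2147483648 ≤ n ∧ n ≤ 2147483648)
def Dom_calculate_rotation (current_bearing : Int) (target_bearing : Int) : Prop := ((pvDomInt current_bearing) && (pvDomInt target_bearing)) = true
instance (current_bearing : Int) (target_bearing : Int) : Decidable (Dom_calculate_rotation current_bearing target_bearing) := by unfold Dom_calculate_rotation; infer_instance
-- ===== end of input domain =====

-- ===== PORT A =====
-- B replaces A's two while-loop reductions by closed-form modular normalization; objective: simpler.
-- while diff > 180: diff -= 360
def pvLoop1 (d : Int) : Int :=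
  if d > 180 then pvLoop1 (d - 360) else d
termination_by d.toNat
decreasing_by omega

-- while diff < -180: diff += 360
def pvLoop2 (d : Int) : Int :=
  if d < -180 then pvLoop2 (d + 360) else d
termination_by (-d).toNat
decreasing_by omega

def calculate_rotation (current_bearing : Int) (target_bearing : Int) : String × Int :=
  let diff := pvLoop2 (pvLoop1 (target_bearing - current_bearing))
  if diff = 0 then ("회전 불필요", 0)
  else if diff > 0 then ("시계방향", diff)
  else ("반시계방향", -diff)

-- ===== PORT B =====
def calculate_rotation_alt (current_bearing : Int) (target_bearing : Int) : String × Int :=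
  let d0 := target_bearing - current_bearing
  let d := if d0 > 180 then 180 - PySem.Int.mod (180 - d0) 360
           else if d0 < -180 then PySem.Int.mod (d0 + 180) 360 - 180
           else d0
  if d = 0 then ("회전 불필요", 0)
  else if d > 0 then ("시계방향", d) else ("반시계방향", -d)

-- ===== PRECONDITION & SPEC =====

def Spec_calculate_rotation (current_bearing : Int) (target_bearing : Int) (out : String × Int) : Prop := out = calculate_rotation_alt current_bearing target_bearing
instance (current_bearing : Int) (target_bearing : Int) (out : String × Int) : Decidable (Spec_calculate_rotation current_bearing target_bearing out) := by unfold Spec_calculate_rotation; infer_instance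

-- ===== CLAIM (what is proved, stated in full; the proofs are below) =====
def Claim_equal_calculate_rotation : Prop := ∀ (current_bearing : Int) (target_bearing : Int), Dom_calculate_rotation current_bearing target_bearing → Spec_calculate_rotation current_bearing target_bearing (calculate_rotation current_bearing target_bearing)

-- ===== LEMMAS AND PROOFS =====

-- ===== VERDICT (by name: the statement is the Claim_ definition above) =====
lemma pvLoop1_gt (d : Int) (h : d > 180) : pvLoop1 d = 180 - (180 - d) % 360 := by
  induction d using pvLoop1.induct with
  | case1 d hgt ih =>
    rw [pvLoop1, if_pos hgt]
    by_cases h2 : d - 360 > 180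
    · rw [ih h2]
      omega
    · rw [pvLoop1, if_neg h2]
      omega
  | case2 d hle => omega

lemma pvLoop1_le (d : Int) (h : ¬ d > 180) : pvLoop1 d = d := by
  rw [pvLoop1, if_neg h]

lemma pvLoop2_lt (d : Int) (h : d < -180) : pvLoop2 d = (d + 180) % 360 - 180 := by
  induction d using pvLoop2.induct with
  | case1 d hlt ih =>
    rw [pvLoop2, if_pos hlt]
    by_cases h2 : d + 360 < -180
    · rw [ih h2]
      omega
    · rw [pvLoop2, if_neg h2]
      omega
  | case2 d hge => omega

lemma pvLoop2_ge (d : Int) (h : ¬ d < -180) : pvLoop2 d = d := by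
  rw [pvLoop2, if_neg h]

theorem calculate_rotation_spec : Claim_equal_calculate_rotation := by
  intro c t _
  unfold Spec_calculate_rotation
  simp only [calculate_rotation, calculate_rotation_alt,
    PySem.Int.mod_eq_emod_of_pos (show (0:Int) < 360 by norm_num)]
  set d0 := t - c with hd0
  by_cases h1 : d0 > 180
  · rw [pvLoop1_gt _ h1, if_pos h1]
    have hb : 0 ≤ (180 - d0) % 360 ∧ (180 - d0) % 360 < 360 :=
      ⟨Int.emod_nonneg _ (by norm_num), Int.emod_lt_of_pos _ (by norm_num)⟩
    rw [pvLoop2_ge _ (by omega)]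
  · rw [pvLoop1_le _ h1]
    by_cases h2 : d0 < -180
    · rw [pvLoop2_lt _ h2, if_neg h1, if_pos h2]
    · rw [pvLoop2_ge _ h2, if_neg h1, if_neg h2]
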